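-- pv_equiv track=rewrite | github.com/FB-18-19-PreAP-CS/wordplay-aa7onv | wordplay_1-6.py | uses_only
-- ===== SOURCE A (Python) =====
-- def uses_only(word, str):
--     '''
--     >>> uses_only('dog','d')
--     False
--     >>> uses_only('dog','Dgol')
--     True
--     >>> uses_only('Texas','tpr')
--     False
--     >>> uses_only('Texas','tmensxa')
--     True
--     >>> uses_only('Longhorn','LHN')
--     False
--     >>> uses_only('waffle','waffle')
--     True
--     >>> uses_only('cvafef ','adbcefgv ')
--     True
--     '''
--     count = 0
--     for i in range(len(word)):
--         if word[i].lower() in str.lower():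
--             count += 1
--     if count == len(word):
--         return True
--
--     return False
-- ===== SOURCE B (Python) =====
-- def uses_only(word, str):
--     # set algebra: every (lowercased) character of word must occur in str
--     return set(word.lower()) <= set(str.lower())
-- ===== Notes on version B (the rewrite author's own statement) =====
-- stated objective: faster
-- what changed: Replaces the index loop with a running match counter and final count==len comparison (which rescans str for every character of word) by building the two lowercased character sets once and returning a single subset test.
import Mathlib
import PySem

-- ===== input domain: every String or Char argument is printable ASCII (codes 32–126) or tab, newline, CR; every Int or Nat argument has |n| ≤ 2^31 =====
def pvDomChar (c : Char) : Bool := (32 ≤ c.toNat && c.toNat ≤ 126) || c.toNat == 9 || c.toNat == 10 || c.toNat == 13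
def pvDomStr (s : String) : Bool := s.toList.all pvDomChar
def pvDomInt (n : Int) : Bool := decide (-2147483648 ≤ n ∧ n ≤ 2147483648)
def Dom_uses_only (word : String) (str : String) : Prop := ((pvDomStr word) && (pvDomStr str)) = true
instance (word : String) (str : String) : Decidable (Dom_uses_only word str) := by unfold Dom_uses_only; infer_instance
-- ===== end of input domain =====

-- B replaces A's index loop + match counter + count==len check by one subset test on the two lowercased character sets (simpler).
-- ===== PORT A =====
def uses_only (word : String) (str : String) : Bool :=
  -- count = 0; for i in range(len(word)): if word[i].lower() in str.lower(): count += 1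
  let count : Int :=
    (PySem.List.pyRange 0 (PySem.Str.len word)).foldl
      (fun count i =>
        if PySem.Chars.isIn [PySem.Chars.lowerChar (PySem.List.pyGetD word.toList i ' ')]
            (PySem.Chars.lower str.toList)
        then count + 1 else count) 0
  if count = PySem.Str.len word then true else false

-- ===== PORT B =====
def uses_only_alt (word : String) (str : String) : Bool :=
  PySem.Set.issubset (PySem.Set.ofList (PySem.Chars.lower word.toList))
                     (PySem.Set.ofList (PySem.Chars.lower str.toList))

-- ===== PRECONDITION & SPEC =====
def Spec_uses_only (word : String) (str : String) (out : Bool) : Prop := out = uses_only_alt word str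
instance (word : String) (str : String) (out : Bool) : Decidable (Spec_uses_only word str out) := by unfold Spec_uses_only; infer_instance

-- ===== CLAIM (what is proved, stated in full; the proofs are below) =====
def Claim_equal_uses_only : Prop := ∀ (word : String) (str : String), Dom_uses_only word str → Spec_uses_only word str (uses_only word str)

-- ===== LEMMAS AND PROOFS =====

-- ===== VERDICT (by name: the statement is the Claim_ definition above) =====
-- a one-character list is an infix iff the character is a member
theorem pv_isIn_singleton (a : Char) (s : List Char) :
    PySem.Chars.isIn [a] s = true ↔ a ∈ s := by
  rw [PySem.Chars.isIn_iff_infix]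
  constructor
  · intro h; exact h.sublist.subset (by simp)
  · intro h
    obtain ⟨u, v, rfl⟩ := List.append_of_mem h
    exact ⟨u, v, by simp⟩

-- A's loop over any character list computes init + (number of characters satisfying p)
theorem pv_foldl_count (p : Char → Bool) (l : List Char) (n : Int) :
    l.foldl (fun c x => if p x then c + 1 else c) n = n + l.countP p := by
  induction l generalizing n with
  | nil => simp
  | cons a l ih =>
    simp only [List.foldl_cons, List.countP_cons, ih]
    split_ifs with h <;> push_cast <;> ring

theorem uses_only_spec : Claim_equal_uses_only := by
  intro word str _
  unfold Spec_uses_only uses_only uses_only_alt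
  rw [show PySem.Str.len word = PySem.List.len word.toList from rfl,
      PySem.List.foldl_pyRange_zero_pyGetD word.toList ' '
        (fun count c =>
          if PySem.Chars.isIn [PySem.Chars.lowerChar c] (PySem.Chars.lower str.toList)
          then count + 1 else count) 0,
      pv_foldl_count]
  have hlen : PySem.List.len word.toList = (word.toList.length : Int) := by
    simp [PySem.List.len]
  by_cases hall : ∀ c ∈ word.toList,
      PySem.Chars.lowerChar c ∈ PySem.Chars.lower str.toList
  · have hc : word.toList.countP
        (fun c => PySem.Chars.isIn [PySem.Chars.lowerChar c] (PySem.Chars.lower str.toList))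
        = word.toList.length := by
      rw [List.countP_eq_length]
      intro c hc; exact (pv_isIn_singleton _ _).2 (hall c hc)
    have hb : PySem.Set.issubset (PySem.Set.ofList (PySem.Chars.lower word.toList))
        (PySem.Set.ofList (PySem.Chars.lower str.toList)) = true := by
      rw [PySem.Set.issubset_iff]
      intro x hx
      rw [PySem.Set.mem_ofList] at hx
      rw [PySem.Set.mem_ofList]
      obtain ⟨c, hcmem, rfl⟩ := List.mem_map.1 hx
      exact hall c hcmem
    simp [hc, hb]
  · push Not at hall
    obtain ⟨c, hcmem, hcnot⟩ := hall
    have hcne : word.toList.countP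
        (fun c => PySem.Chars.isIn [PySem.Chars.lowerChar c] (PySem.Chars.lower str.toList))
        ≠ word.toList.length := by
      intro h
      exact hcnot ((pv_isIn_singleton _ _).1 (List.countP_eq_length.1 h c hcmem))
    have hb : PySem.Set.issubset (PySem.Set.ofList (PySem.Chars.lower word.toList))
        (PySem.Set.ofList (PySem.Chars.lower str.toList)) = false := by
      rw [Bool.eq_false_iff]
      intro h
      rw [PySem.Set.issubset_iff] at h
      exact hcnot (by
        have := h (PySem.Chars.lowerChar c)
          ((PySem.Set.mem_ofList _ _).2 (List.mem_map_of_mem hcmem))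
        exact (PySem.Set.mem_ofList _ _).1 this)
    rw [hb, hlen]
    simp only [zero_add]
    split_ifs with h
    · exact absurd (by exact_mod_cast h) hcne
    · rfl
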